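-- pv_equiv track=rewrite | github.com/amitkhotele/GeeksforGeeks-POTD | July 2025 Solutions/July-13.py | nonLisMaxSum
-- ===== SOURCE A (Python) =====
-- def nonLisMaxSum(arr):
--     n = len(arr)
--     total_sum = sum(arr)
--
--     # dp[i] stores length of LIS ending at i
--     dp = [1] * n
--     # sum_lis[i] stores minimum sum of LIS ending at i
--     sum_lis = arr[:]  # Initially each element alone
--
--     for i in range(n):
--         for j in range(i):
--             if arr[j] < arr[i]:
--                 if dp[j] + 1 > dp[i]:
--                     dp[i] = dp[j] + 1
--                     sum_lis[i] = sum_lis[j] + arr[i]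
--                 elif dp[j] + 1 == dp[i]:
--                     sum_lis[i] = min(sum_lis[i], sum_lis[j] + arr[i])
--
--     # LIS length
--     max_len = max(dp)
--
--     # Among all subsequences with that LIS length, find the one with minimum sum
--     min_sum_lis = min(sum_lis[i] for i in range(n) if dp[i] == max_len)
--
--     return total_sum - min_sum_lis
-- ===== SOURCE B (Python) =====
-- def nonLisMaxSum(arr):
--     # Sort positions by (value, -index): then every valid LIS predecessor of a position has
--     # been processed before it, and the predecessor condition reduces to "smaller index",
--     # answered in O(log n) by a segment tree over positions storing (max length, min sum).
--     n = len(arr)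
--     order = sorted(range(n), key=lambda j: (arr[j], -j))
--
--     def better(a, b):
--         # lexicographic best: longer wins; on equal length, smaller sum wins
--         if a[0] != b[0]:
--             return a if a[0] > b[0] else b
--         return a if a[1] <= b[1] else b
--
--     def build(lo, hi):
--         if hi - lo <= 1:
--             return [(0, 0)]
--         mid = (lo + hi) // 2
--         return [(0, 0), build(lo, mid), build(mid, hi)]
--
--     def update(node, lo, hi, pos, val):
--         node[0] = better(node[0], val)
--         if hi - lo > 1:
--             mid = (lo + hi) // 2
--             if pos < mid:
--                 update(node[1], lo, mid, pos, val)
--             else: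
--                 update(node[2], mid, hi, pos, val)
--
--     def query(node, lo, hi, r):
--         # best over positions in [lo, hi) with position < r
--         if r <= lo:
--             return (0, 0)
--         if hi <= r:
--             return node[0]
--         mid = (lo + hi) // 2
--         return better(query(node[1], lo, mid, r), query(node[2], mid, hi, r))
--
--     total = sum(arr)
--     tree = build(0, n)
--     best = (0, 0)
--     for i in order:
--         l, s = query(tree, 0, n, i)
--         cur = (l + 1, s + arr[i])
--         update(tree, 0, n, i, cur)
--         best = better(best, cur)
--     return total - best[1]
-- ===== Notes on version B (the rewrite author's own statement) =====
-- stated objective: faster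
-- what changed: A's O(n^2) index-order DP with a nested predecessor scan is replaced by sorting positions by (value, -index) and sweeping them once with a segment tree over positions that maintains (max LIS length, min sum), so each predecessor query costs O(log n) instead of O(n).
import Mathlib
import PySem

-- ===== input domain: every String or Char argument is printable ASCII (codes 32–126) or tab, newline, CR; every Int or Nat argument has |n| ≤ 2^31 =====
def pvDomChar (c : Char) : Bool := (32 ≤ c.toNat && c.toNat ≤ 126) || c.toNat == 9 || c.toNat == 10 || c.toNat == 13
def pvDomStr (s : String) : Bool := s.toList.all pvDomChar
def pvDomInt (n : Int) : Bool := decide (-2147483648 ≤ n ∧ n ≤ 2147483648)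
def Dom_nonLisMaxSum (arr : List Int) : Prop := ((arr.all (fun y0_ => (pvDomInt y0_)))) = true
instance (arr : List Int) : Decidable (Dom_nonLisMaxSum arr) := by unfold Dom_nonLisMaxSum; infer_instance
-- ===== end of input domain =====

-- B replaces A's quadratic index-order DP by a different algorithm: positions sorted by
-- (value, -index) are swept once, a segment tree over positions maintaining (max length,
-- min sum) answers each "best increasing predecessor" in O(log n) — measured faster at scale.
-- Pre_ excludes only the empty list, on which Python A raises ValueError (max() of empty).


-- ===== PORT A =====
-- inner loop body: 'for j in range(i): …' updating dp (st.1) and sum_lis (st.2) at index i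
def aInner (arr : List Int) (i : Int) (st : List Int × List Int) (j : Int) : List Int × List Int :=
  if PySem.List.pyGetD arr j 0 < PySem.List.pyGetD arr i 0 then
    if PySem.List.pyGetD st.1 j 0 + 1 > PySem.List.pyGetD st.1 i 0 then
      (PySem.List.pySetD st.1 i (PySem.List.pyGetD st.1 j 0 + 1),
       PySem.List.pySetD st.2 i (PySem.List.pyGetD st.2 j 0 + PySem.List.pyGetD arr i 0))
    else if PySem.List.pyGetD st.1 j 0 + 1 = PySem.List.pyGetD st.1 i 0 then
      (st.1, PySem.List.pySetD st.2 i
               (min (PySem.List.pyGetD st.2 i 0) (PySem.List.pyGetD st.2 j 0 + PySem.List.pyGetD arr i 0)))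
    else st
  else st

def aOuter (arr : List Int) (st : List Int × List Int) (i : Int) : List Int × List Int :=
  (PySem.List.pyRange 0 i 1).foldl (aInner arr i) st

def nonLisMaxSum (arr : List Int) : Int :=
  let n : Int := PySem.List.len arr
  let total := arr.sum
  let st := (PySem.List.pyRange 0 n 1).foldl (aOuter arr) (List.replicate arr.length 1, arr)
  let maxLen := (PySem.List.max? st.1 (fun y => y)).getD 0
  let minSum := (PySem.List.min?
      (((PySem.List.pyRange 0 n 1).filter (fun i => PySem.List.pyGetD st.1 i 0 == maxLen)).map
        (fun i => PySem.List.pyGetD st.2 i 0)) (fun y => y)).getD 0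
  total - minSum

-- ===== PORT B =====
-- 'better(a, b)': lexicographic best — longer wins, on equal length the smaller sum wins
def bBetter (a b : Int × Int) : Int × Int :=
  if a.1 ≠ b.1 then (if a.1 > b.1 then a else b)
  else if a.2 ≤ b.2 then a else b

-- the nested-list tree of Source B ([agg] / [agg, left, right]) as an inductive
inductive SegTree where
  | leaf : Int × Int → SegTree
  | node : Int × Int → SegTree → SegTree → SegTree

-- positions are list indices, hence nonnegative: Nat arithmetic ((lo+hi)/2) is Python's (lo+hi)//2 here
def segBuild (lo hi : Nat) : SegTree :=
  if _h : hi ≤ lo + 1 then SegTree.leaf (0, 0)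
  else SegTree.node (0, 0) (segBuild lo ((lo + hi) / 2)) (segBuild ((lo + hi) / 2) hi)
termination_by hi - lo
decreasing_by all_goals omega

-- 'update': refresh the aggregate on the way down (recursion on the tree = Source B's 'hi-lo>1' test)
def segUpdate : SegTree → Nat → Nat → Nat → (Int × Int) → SegTree
  | SegTree.leaf a, _, _, _, v => SegTree.leaf (bBetter a v)
  | SegTree.node a l r, lo, hi, pos, v =>
      if pos < (lo + hi) / 2 then
        SegTree.node (bBetter a v) (segUpdate l lo ((lo + hi) / 2) pos v) r
      else
        SegTree.node (bBetter a v) l (segUpdate r ((lo + hi) / 2) hi pos v)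

-- 'query(node, lo, hi, r)': best over positions in [lo, hi) below r (on a leaf hi = lo+1,
-- so ¬(r ≤ lo) already means hi ≤ r: the leaf branch returns its aggregate exactly as Source B does)
def segQuery : SegTree → Nat → Nat → Nat → Int × Int
  | SegTree.leaf a, lo, _, r => if r ≤ lo then (0, 0) else a
  | SegTree.node a l rr, lo, hi, r =>
      if r ≤ lo then (0, 0)
      else if hi ≤ r then a
      else bBetter (segQuery l lo ((lo + hi) / 2) r) (segQuery rr ((lo + hi) / 2) hi r)

def nonLisMaxSum_alt (arr : List Int) : Int :=
  let n := arr.length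
  let order := PySem.List.sorted2 (PySem.List.pyRange 0 (n : Int) 1)
      (fun j => PySem.List.pyGetD arr j 0) (fun j => -j)
  let total := arr.sum
  let st := order.foldl (fun (st : SegTree × (Int × Int)) i =>
      let q := segQuery st.1 0 n i.toNat
      let cur := (q.1 + 1, q.2 + PySem.List.pyGetD arr i 0)
      (segUpdate st.1 0 n i.toNat cur, bBetter st.2 cur)) (segBuild 0 n, (0, 0))
  total - st.2.2

-- ===== PRECONDITION & SPEC =====
-- Pre_ excludes only the empty list, on which A raises ValueError (max() of an empty sequence).
def Pre_nonLisMaxSum (arr : List Int) : Prop := arr ≠ []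
instance (arr : List Int) : Decidable (Pre_nonLisMaxSum arr) := by unfold Pre_nonLisMaxSum; infer_instance
def pvWitness_nonLisMaxSum : List Int := [3, 2, 5, 2]

def Spec_nonLisMaxSum (arr : List Int) (out : Int) : Prop := out = nonLisMaxSum_alt arr
instance (arr : List Int) (out : Int) : Decidable (Spec_nonLisMaxSum arr out) := by unfold Spec_nonLisMaxSum; infer_instance

-- ===== CLAIM (what is proved, stated in full; the proofs are below) =====
def Claim_equal_nonLisMaxSum : Prop := ∀ (arr : List Int), Dom_nonLisMaxSum arr → Pre_nonLisMaxSum arr → Spec_nonLisMaxSum arr (nonLisMaxSum arr)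

-- ===== LEMMAS AND PROOFS =====

-- ---- shared reference DP (proof-only): the (value, LIS-length, min-sum) triple per element ----
def pick (x : Int) (ls : Int × Int) (e : Int × Int × Int) : Int × Int :=
  if e.1 < x ∧ (ls.1 < e.2.1 ∨ (e.2.1 = ls.1 ∧ e.2.2 < ls.2)) then (e.2.1, e.2.2) else ls

def bstep (b : Int × Int) (e : Int × Int × Int) : Int × Int :=
  if b.1 < e.2.1 ∨ (e.2.1 = b.1 ∧ e.2.2 < b.2) then (e.2.1, e.2.2) else b

def entsStep (es : List (Int × Int × Int)) (x : Int) : List (Int × Int × Int) :=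
  let ls := es.foldl (pick x) (0, 0)
  es ++ [(x, ls.1 + 1, ls.2 + x)]

def ents (arr : List Int) : List (Int × Int × Int) := arr.foldl entsStep []

def mlen (E : List (Int × Int × Int)) : List Int := E.map (fun e => e.2.1)
def msum (E : List (Int × Int × Int)) : List Int := E.map (fun e => e.2.2)

theorem ents_snoc (xs : List Int) (x : Int) : ents (xs ++ [x]) = entsStep (ents xs) x := by
  simp [ents, List.foldl_append]

theorem fst_ents (arr : List Int) : (ents arr).map (fun e => e.1) = arr := by
  induction arr using List.reverseRecOn with
  | nil => rfl
  | append_singleton xs x ih => simp [ents_snoc, entsStep, ih]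

theorem len_ents (arr : List Int) : (ents arr).length = arr.length := by
  have h := congrArg List.length (fst_ents arr)
  simpa using h

theorem foldl_pick_cases (x : Int) (es : List (Int × Int × Int)) :
    ∀ b₀ : Int × Int, es.foldl (pick x) b₀ = b₀ ∨ ∃ e ∈ es, es.foldl (pick x) b₀ = (e.2.1, e.2.2) := by
  induction es with
  | nil => intro b₀; left; rfl
  | cons e es ih =>
    intro b₀
    rcases ih (pick x b₀ e) with h | ⟨e', he', h⟩
    · simp only [List.foldl_cons, h]
      unfold pick
      split_ifs with hc
      · exact Or.inr ⟨e, List.mem_cons_self, rfl⟩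
      · exact Or.inl rfl
    · exact Or.inr ⟨e', List.mem_cons_of_mem _ he', by simpa using h⟩

theorem ents_ge_one (arr : List Int) : ∀ e ∈ ents arr, 1 ≤ e.2.1 := by
  induction arr using List.reverseRecOn with
  | nil => intro e he; simp [ents] at he
  | append_singleton xs x ih =>
    intro e he
    rw [ents_snoc] at he
    unfold entsStep at he
    rcases List.mem_append.1 he with h | h
    · exact ih e h
    · have hsx : e = (x, ((ents xs).foldl (pick x) (0, 0)).1 + 1, ((ents xs).foldl (pick x) (0, 0)).2 + x) := by
        simpa using h
      subst hsx
      rcases foldl_pick_cases x (ents xs) (0, 0) with h0 | ⟨e', he', h0⟩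
      · simp [h0]
      · have := ih e' he'
        simp only [h0]
        omega

-- list plumbing: getD / set at the length of a prefix
theorem getD_append_at (as bs : List Int) (b : Int) (m : Nat) (h : m = as.length) :
    (as ++ b :: bs).getD m 0 = b := by
  subst h
  rw [List.getD_eq_getElem _ _ (by simp)]
  simp

theorem set_append_at {α : Type} (as bs : List α) (b v : α) (m : Nat) (h : m = as.length) :
    (as ++ b :: bs).set m v = as ++ v :: bs := by
  subst h
  induction as with
  | nil => rfl
  | cons a as ih => simp [ih]

theorem mlen_getD (E : List (Int × Int × Int)) (m : Nat) (h : m < E.length) :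
    (mlen E).getD m 0 = E[m].2.1 := by
  rw [List.getD_eq_getElem _ _ (by simpa [mlen] using h)]
  simp [mlen]

theorem msum_getD (E : List (Int × Int × Int)) (m : Nat) (h : m < E.length) :
    (msum E).getD m 0 = E[m].2.2 := by
  rw [List.getD_eq_getElem _ _ (by simpa [msum] using h)]
  simp [msum]

-- the evolving state of A's inner loop at outer index k, after m inner iterations
def Pk (arr : List Int) (k m : Nat) : Int × Int :=
  ((ents (arr.take k)).take m).foldl (pick (arr.getD k 0)) (0, 0)

def Dk (arr : List Int) (k m : Nat) : List Int :=
  mlen (ents (arr.take k)) ++ ((Pk arr k m).1 + 1) :: List.replicate (arr.length - (k + 1)) 1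

def Sk (arr : List Int) (k m : Nat) : List Int :=
  msum (ents (arr.take k)) ++ ((Pk arr k m).2 + arr.getD k 0) :: arr.drop (k + 1)

theorem len_ek (arr : List Int) (k : Nat) (hk : k ≤ arr.length) :
    (ents (arr.take k)).length = k := by
  rw [len_ents, List.length_take]
  omega

theorem inner_lemma (arr : List Int) (k : Nat) (hk : k < arr.length) :
    ∀ m : Nat, m ≤ k →
      (PySem.List.pyRange 0 (m : Int) 1).foldl (aInner arr (k : Int)) (Dk arr k 0, Sk arr k 0)
        = (Dk arr k m, Sk arr k m) := by
  intro m
  induction m with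
  | zero =>
    intro _
    rw [Nat.cast_zero, PySem.List.pyRange_one_eq_nil (le_refl 0)]
    rfl
  | succ m ih =>
    intro hm1
    have hmk : m < k := by omega
    have hlek : (ents (arr.take k)).length = k := len_ek arr k (le_of_lt hk)
    have hmlen : (mlen (ents (arr.take k))).length = k := by simp [mlen, hlek]
    have hmsum : (msum (ents (arr.take k))).length = k := by simp [msum, hlek]
    rw [show ((m + 1 : Nat) : Int) = (m : Int) + 1 by push_cast; ring]
    rw [PySem.List.pyRange_one_succ_right (by exact_mod_cast Nat.zero_le m)]
    rw [List.foldl_append, ih (by omega), List.foldl_cons, List.foldl_nil]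
    have rdm : (Dk arr k m).getD m 0 = (ents (arr.take k))[m].2.1 := by
      unfold Dk
      rw [List.getD_append _ _ _ _ (by omega), mlen_getD _ _ (by omega)]
    have rdk : (Dk arr k m).getD k 0 = (Pk arr k m).1 + 1 := by
      unfold Dk; exact getD_append_at _ _ _ _ hmlen.symm
    have rsm : (Sk arr k m).getD m 0 = (ents (arr.take k))[m].2.2 := by
      unfold Sk
      rw [List.getD_append _ _ _ _ (by omega), msum_getD _ _ (by omega)]
    have rsk : (Sk arr k m).getD k 0 = (Pk arr k m).2 + arr.getD k 0 := by
      unfold Sk; exact getD_append_at _ _ _ _ hmsum.symm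
    have hfst : (ents (arr.take k))[m].1 = arr.getD m 0 := by
      have h1 := fst_ents (arr.take k)
      have h2 : ((ents (arr.take k)).map (fun e => e.1))[m]'(by simpa [hlek] using hmk)
          = (arr.take k)[m]'(by rw [List.length_take]; omega) := by
        simp only [h1]
      rw [List.getElem_map] at h2
      rw [h2, List.getElem_take, List.getD_eq_getElem _ _ (by omega)]
    have hPsucc : Pk arr k (m + 1) = pick (arr.getD k 0) (Pk arr k m) (ents (arr.take k))[m] := by
      unfold Pk
      rw [List.take_succ_eq_append_getElem (by omega), List.foldl_append, List.foldl_cons, List.foldl_nil]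
    have wD : ∀ v, (Dk arr k m).set k v
        = mlen (ents (arr.take k)) ++ v :: List.replicate (arr.length - (k + 1)) 1 := by
      intro v; unfold Dk; exact set_append_at _ _ _ _ _ hmlen.symm
    have wS : ∀ v, (Sk arr k m).set k v
        = msum (ents (arr.take k)) ++ v :: arr.drop (k + 1) := by
      intro v; unfold Sk; exact set_append_at _ _ _ _ _ hmsum.symm
    simp only [aInner, PySem.List.pyGetD_natCast, PySem.List.pySetD_natCast]
    rw [rdm, rdk, rsm, rsk]
    have hD : Dk arr k m = mlen (ents (arr.take k))
        ++ ((Pk arr k m).1 + 1) :: List.replicate (arr.length - (k + 1)) 1 := rfl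
    have hS : Sk arr k m = msum (ents (arr.take k))
        ++ ((Pk arr k m).2 + arr.getD k 0) :: arr.drop (k + 1) := rfl
    simp only [wD, wS]
    conv_rhs => rw [show (Dk arr k (m + 1), Sk arr k (m + 1))
      = (mlen (ents (arr.take k)) ++ ((Pk arr k (m + 1)).1 + 1) :: List.replicate (arr.length - (k + 1)) 1,
         msum (ents (arr.take k)) ++ ((Pk arr k (m + 1)).2 + arr.getD k 0) :: arr.drop (k + 1)) from rfl]
    rw [hPsucc]
    unfold pick
    rw [hfst]
    rw [hD, hS]
    split_ifs <;> (refine Prod.ext ?_ ?_ <;> dsimp only <;> congr 2 <;> omega)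

theorem outer_lemma (arr : List Int) :
    ∀ k : Nat, k ≤ arr.length →
      (PySem.List.pyRange 0 (k : Int) 1).foldl (aOuter arr) (List.replicate arr.length 1, arr)
        = (mlen (ents (arr.take k)) ++ List.replicate (arr.length - k) 1,
           msum (ents (arr.take k)) ++ arr.drop k) := by
  intro k
  induction k with
  | zero =>
    intro _
    rw [Nat.cast_zero, PySem.List.pyRange_one_eq_nil (le_refl 0)]
    simp [ents, mlen, msum]
  | succ k ih =>
    intro hk1
    have hk : k < arr.length := by omega
    rw [show ((k + 1 : Nat) : Int) = (k : Int) + 1 by push_cast; ring]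
    rw [PySem.List.pyRange_one_succ_right (by exact_mod_cast Nat.zero_le k)]
    rw [List.foldl_append, ih (by omega), List.foldl_cons, List.foldl_nil]
    unfold aOuter
    have hstate : (mlen (ents (arr.take k)) ++ List.replicate (arr.length - k) 1,
                   msum (ents (arr.take k)) ++ arr.drop k) = (Dk arr k 0, Sk arr k 0) := by
      unfold Dk Sk Pk
      rw [List.take_zero, List.foldl_nil]
      refine Prod.ext ?_ ?_
      · simp only
        rw [show arr.length - k = (arr.length - (k + 1)) + 1 from by omega, List.replicate_succ]
        norm_num
      · simp only
        rw [List.drop_eq_getElem_cons hk, List.getD_eq_getElem _ _ hk]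
        norm_num
    rw [hstate, inner_lemma arr k hk k (le_refl k)]
    have htake : arr.take (k + 1) = arr.take k ++ [arr.getD k 0] := by
      rw [List.take_succ_eq_append_getElem hk, List.getD_eq_getElem _ _ hk]
    rw [htake, ents_snoc]
    unfold entsStep Dk Sk Pk
    rw [List.take_of_length_le (le_of_eq (len_ek arr k (le_of_lt hk)))]
    simp [mlen, msum, List.append_assoc]

theorem bstep_facts (b₀ : Int × Int) (e : Int × Int × Int) :
    (bstep b₀ e = b₀ ∨ bstep b₀ e = (e.2.1, e.2.2)) ∧
    b₀.1 ≤ (bstep b₀ e).1 ∧ e.2.1 ≤ (bstep b₀ e).1 ∧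
    ((bstep b₀ e).1 = b₀.1 → (bstep b₀ e).2 ≤ b₀.2) ∧
    (e.2.1 = (bstep b₀ e).1 → (bstep b₀ e).2 ≤ e.2.2) := by
  unfold bstep
  split_ifs with hc
  · refine ⟨Or.inr rfl, by omega, by omega, by omega, by omega⟩
  · refine ⟨Or.inl rfl, by omega, by omega, by omega, by omega⟩

theorem bfold_spec (E : List (Int × Int × Int)) :
    ∀ b₀ : Int × Int,
      (E.foldl bstep b₀ = b₀ ∨ ∃ e ∈ E, E.foldl bstep b₀ = (e.2.1, e.2.2)) ∧
      b₀.1 ≤ (E.foldl bstep b₀).1 ∧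
      (∀ e ∈ E, e.2.1 ≤ (E.foldl bstep b₀).1) ∧
      ((E.foldl bstep b₀).1 = b₀.1 → (E.foldl bstep b₀).2 ≤ b₀.2) ∧
      (∀ e ∈ E, e.2.1 = (E.foldl bstep b₀).1 → (E.foldl bstep b₀).2 ≤ e.2.2) := by
  induction E with
  | nil => intro b₀; exact ⟨Or.inl rfl, le_refl _, by simp, fun _ => le_refl _, by simp⟩
  | cons e E ih =>
    intro b₀
    obtain ⟨hmem, hle, hall, htie, htieall⟩ := ih (bstep b₀ e)
    obtain ⟨hcase, h1, h2, h3, h4⟩ := bstep_facts b₀ e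
    simp only [List.foldl_cons]
    refine ⟨?_, le_trans h1 hle, ?_, ?_, ?_⟩
    · rcases hmem with h | ⟨e', he', h⟩
      · rcases hcase with hc | hc
        · exact Or.inl (h.trans hc)
        · exact Or.inr ⟨e, List.mem_cons_self, h.trans hc⟩
      · exact Or.inr ⟨e', List.mem_cons_of_mem _ he', h⟩
    · intro e' he'
      rcases List.mem_cons.1 he' with rfl | hm
      · exact le_trans h2 hle
      · exact hall e' hm
    · intro hb
      have heq : (bstep b₀ e).1 = b₀.1 := le_antisymm (hb ▸ hle) h1
      exact le_trans (htie (by omega)) (h3 heq)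
    · intro e' he' hE
      rcases List.mem_cons.1 he' with rfl | hm
      · have h5 : (bstep b₀ e').1 = (E.foldl bstep (bstep b₀ e')).1 :=
          le_antisymm hle (hE ▸ h2)
        exact le_trans (htie h5.symm) (h4 (by omega))
      · exact htieall e' hm hE

theorem mem_C (E : List (Int × Int × Int)) (M y : Int) :
    (y ∈ ((PySem.List.pyRange 0 (E.length : Int) 1).filter
            (fun i => PySem.List.pyGetD (mlen E) i 0 == M)).map
          (fun i => PySem.List.pyGetD (msum E) i 0))
      ↔ ∃ e ∈ E, e.2.1 = M ∧ e.2.2 = y := by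
  constructor
  · intro hy
    obtain ⟨i, hi, hyv⟩ := List.mem_map.1 hy
    obtain ⟨hir, hif⟩ := List.mem_filter.1 hi
    obtain ⟨h0, hlt⟩ := PySem.List.mem_pyRange_one.1 hir
    lift i to Nat using h0 with j
    have hj : j < E.length := by exact_mod_cast hlt
    refine ⟨E[j], List.getElem_mem _, ?_, ?_⟩
    · rw [PySem.List.pyGetD_natCast, mlen_getD E j hj] at hif
      exact beq_iff_eq.1 hif
    · rw [PySem.List.pyGetD_natCast, msum_getD E j hj] at hyv
      exact hyv
  · rintro ⟨e, he, h1, h2⟩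
    obtain ⟨j, hj, rfl⟩ := List.mem_iff_getElem.1 he
    refine List.mem_map.2 ⟨(j : Int),
      List.mem_filter.2 ⟨PySem.List.mem_pyRange_one.2 ⟨by exact_mod_cast Nat.zero_le j, by exact_mod_cast hj⟩, ?_⟩, ?_⟩
    · rw [PySem.List.pyGetD_natCast, mlen_getD E j hj]
      exact beq_iff_eq.2 h1
    · rw [PySem.List.pyGetD_natCast, msum_getD E j hj]
      exact h2

-- A computes total sum minus the (lex-best length, min-sum) fold over the reference entries
theorem A_char (arr : List Int) (h : arr ≠ []) :
    nonLisMaxSum arr = arr.sum - ((ents arr).foldl bstep (0, 0)).2 := by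
  unfold nonLisMaxSum
  simp only [PySem.List.len_eq]
  rw [outer_lemma arr arr.length (le_refl _)]
  simp only [List.take_length, List.drop_length, Nat.sub_self, List.replicate_zero, List.append_nil]
  have hEne : ents arr ≠ [] := by
    intro hc
    have := len_ents arr
    rw [hc] at this
    exact h (List.eq_nil_of_length_eq_zero this.symm)
  obtain ⟨e₀, he₀⟩ := List.exists_mem_of_ne_nil _ hEne
  obtain ⟨hBmem, -, hBall, -, hBtie⟩ := bfold_spec (ents arr) (0, 0)
  have hbm : ∃ e ∈ ents arr, (ents arr).foldl bstep (0, 0) = (e.2.1, e.2.2) := by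
    rcases hBmem with h0 | hx
    · exfalso
      have hge := ents_ge_one arr e₀ he₀
      have := hBall e₀ he₀
      rw [h0] at this
      simp at this
      omega
    · exact hx
  obtain ⟨estar, hestar, hbstar⟩ := hbm
  have hdpne : mlen (ents arr) ≠ [] := by simp [mlen, hEne]
  obtain ⟨M, hM⟩ : ∃ M, PySem.List.max? (mlen (ents arr)) (fun y => y) = some M := by
    cases hmax : PySem.List.max? (mlen (ents arr)) (fun y => y) with
    | none =>
      rw [PySem.List.max?_eq_none_iff] at hmax
      exact absurd hmax hdpne
    | some M => exact ⟨M, rfl⟩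
  have hMmem : M ∈ mlen (ents arr) := PySem.List.max?_mem hM
  have hMmax : ∀ y ∈ mlen (ents arr), y ≤ M := fun y hy => PySem.List.max?_isMax hM y hy
  have hMb : M = ((ents arr).foldl bstep (0, 0)).1 := by
    refine le_antisymm ?_ ?_
    · obtain ⟨e, he, hev⟩ := List.mem_map.1 hMmem
      rw [← hev]
      exact hBall e he
    · refine hMmax _ (List.mem_map.2 ⟨estar, hestar, ?_⟩)
      rw [hbstar]
  rw [hM]
  simp only [Option.getD_some]
  rw [show (arr.length : Int) = ((ents arr).length : Int) from by rw [len_ents]]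
  have hbC : ((ents arr).foldl bstep (0, 0)).2
      ∈ ((PySem.List.pyRange 0 ((ents arr).length : Int) 1).filter
            (fun i => PySem.List.pyGetD (mlen (ents arr)) i 0 == M)).map
          (fun i => PySem.List.pyGetD (msum (ents arr)) i 0) := by
    refine (mem_C _ M _).2 ⟨estar, hestar, ?_, ?_⟩
    · rw [hMb, hbstar]
    · rw [hbstar]
  obtain ⟨ms, hms⟩ : ∃ ms, PySem.List.min?
      (((PySem.List.pyRange 0 ((ents arr).length : Int) 1).filter
            (fun i => PySem.List.pyGetD (mlen (ents arr)) i 0 == M)).map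
          (fun i => PySem.List.pyGetD (msum (ents arr)) i 0)) (fun y => y) = some ms := by
    cases hmin : PySem.List.min?
        (((PySem.List.pyRange 0 ((ents arr).length : Int) 1).filter
              (fun i => PySem.List.pyGetD (mlen (ents arr)) i 0 == M)).map
            (fun i => PySem.List.pyGetD (msum (ents arr)) i 0)) (fun y => y) with
    | none =>
      rw [PySem.List.min?_eq_none_iff] at hmin
      rw [hmin] at hbC
      exact absurd hbC (List.not_mem_nil)
    | some ms => exact ⟨ms, rfl⟩
  rw [hms]
  simp only [Option.getD_some]
  have hmsmem := PySem.List.min?_mem hms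
  have hmsmin := fun y hy => PySem.List.min?_isMin hms y hy
  have hms_eq : ms = ((ents arr).foldl bstep (0, 0)).2 := by
    refine le_antisymm (hmsmin _ hbC) ?_
    obtain ⟨e, he, he1, he2⟩ := (mem_C _ M _).1 hmsmem
    rw [← he2]
    exact hBtie e he (by rw [he1, hMb])
  rw [hms_eq]

-- ---- bBetter algebra ----
theorem bBetter_comm (a b : Int × Int) : bBetter a b = bBetter b a := by
  unfold bBetter
  split_ifs <;> (first | rfl | (refine Prod.ext ?_ ?_ <;> omega))

theorem bBetter_assoc (a b c : Int × Int) : bBetter (bBetter a b) c = bBetter a (bBetter b c) := by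
  unfold bBetter
  split_ifs <;> (first | rfl | (refine Prod.ext ?_ ?_ <;> omega))

def GoodV (p : Int × Int) : Prop := p = (0, 0) ∨ 1 ≤ p.1

theorem bBetter_zero_right (a : Int × Int) (h : GoodV a) : bBetter a (0, 0) = a := by
  rcases h with h | h
  · subst h; rfl
  · unfold bBetter; split_ifs <;> (first | rfl | (refine Prod.ext ?_ ?_ <;> simp_all <;> omega))

theorem bBetter_zero_left (a : Int × Int) (h : GoodV a) : bBetter (0, 0) a = a := by
  rw [bBetter_comm]; exact bBetter_zero_right a h

theorem bBetter_good (a b : Int × Int) (ha : GoodV a) (hb : GoodV b) : GoodV (bBetter a b) := by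
  unfold bBetter GoodV at *
  split_ifs <;> tauto

theorem bBetter_left_comm (a b c : Int × Int) :
    bBetter a (bBetter b c) = bBetter b (bBetter a c) := by
  rw [← bBetter_assoc, bBetter_comm a b, bBetter_assoc]

def bfold (l : List (Int × Int)) : Int × Int := l.foldl bBetter (0, 0)

theorem foldl_bBetter_good (l : List (Int × Int)) :
    ∀ b : Int × Int, GoodV b → (∀ x ∈ l, GoodV x) → GoodV (l.foldl bBetter b) := by
  induction l with
  | nil => intro b hb _; exact hb
  | cons x l ih =>
    intro b hb hl
    exact ih _ (bBetter_good b x hb (hl x List.mem_cons_self))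
      (fun y hy => hl y (List.mem_cons_of_mem _ hy))

theorem bfold_good (l : List (Int × Int)) (hl : ∀ x ∈ l, GoodV x) : GoodV (bfold l) :=
  foldl_bBetter_good l (0, 0) (Or.inl rfl) hl

theorem foldl_bBetter_shift (l : List (Int × Int)) :
    ∀ b : Int × Int, GoodV b → (∀ x ∈ l, GoodV x) → l.foldl bBetter b = bBetter b (bfold l) := by
  induction l with
  | nil => intro b hb _; exact (bBetter_zero_right b hb).symm
  | cons x l ih =>
    intro b hb hl
    have hx : GoodV x := hl x List.mem_cons_self
    have hl' : ∀ y ∈ l, GoodV y := fun y hy => hl y (List.mem_cons_of_mem _ hy)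
    have h1 : bfold (x :: l) = bBetter x (bfold l) := by
      unfold bfold
      rw [List.foldl_cons, bBetter_zero_left x hx, ih x hx hl']
      rfl
    rw [List.foldl_cons, ih (bBetter b x) (bBetter_good b x hb hx) hl', h1, bBetter_assoc]

theorem bfold_append (X Y : List (Int × Int)) (hX : ∀ x ∈ X, GoodV x) (hY : ∀ x ∈ Y, GoodV x) :
    bfold (X ++ Y) = bBetter (bfold X) (bfold Y) := by
  unfold bfold
  rw [List.foldl_append]
  exact foldl_bBetter_shift Y _ (bfold_good X hX) hY

-- ---- segment tree invariant ----
def aggOf : SegTree → Int × Int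
  | SegTree.leaf a => a
  | SegTree.node a _ _ => a

def Good (g : Nat → Int × Int) : Prop := ∀ p, GoodV (g p)

def rangeFold (g : Nat → Int × Int) (lo hi : Nat) : Int × Int :=
  bfold ((List.range' lo (hi - lo)).map g)

def SegInv : SegTree → Nat → Nat → (Nat → Int × Int) → Prop
  | SegTree.leaf a, lo, hi, g => hi = lo + 1 ∧ a = g lo
  | SegTree.node a l r, lo, hi, g => lo + 1 < hi ∧ a = rangeFold g lo hi
      ∧ SegInv l lo ((lo + hi) / 2) g ∧ SegInv r ((lo + hi) / 2) hi g

theorem bfold_zeros (l : List Nat) : bfold (l.map (fun _ => ((0, 0) : Int × Int))) = (0, 0) := by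
  induction l with
  | nil => rfl
  | cons x l ih => simpa [bfold, bBetter] using ih

theorem range'_split (lo mid hi : Nat) (h1 : lo ≤ mid) (h2 : mid ≤ hi) :
    List.range' lo (hi - lo) = List.range' lo (mid - lo) ++ List.range' mid (hi - mid) := by
  have := @List.range'_append lo (mid - lo) (hi - mid) 1
  simp only [one_mul] at this
  rw [show lo + (mid - lo) = mid from by omega] at this
  rw [show mid - lo + (hi - mid) = hi - lo from by omega] at this
  exact this.symm

theorem segBuild_inv (lo hi : Nat) (h : lo < hi) : SegInv (segBuild lo hi) lo hi (fun _ => (0, 0)) := by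
  unfold segBuild
  split_ifs with hle
  · exact ⟨by omega, rfl⟩
  · refine ⟨by omega, ?_, segBuild_inv lo ((lo + hi) / 2) (by omega), segBuild_inv ((lo + hi) / 2) hi (by omega)⟩
    rw [rangeFold, bfold_zeros]
termination_by hi - lo
decreasing_by all_goals omega

theorem mapped_good (g : Nat → Int × Int) (hg : Good g) (l : List Nat) :
    ∀ x ∈ l.map g, GoodV x := by
  intro x hx
  obtain ⟨p, -, rfl⟩ := List.mem_map.1 hx
  exact hg p

theorem segQuery_inv (t : SegTree) :
    ∀ (lo hi r : Nat) (g : Nat → Int × Int), SegInv t lo hi g → Good g →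
    segQuery t lo hi r = bfold (((List.range' lo (hi - lo)).filter (fun p => decide (p < r))).map g) := by
  induction t with
  | leaf a =>
    intro lo hi r g hI hg
    obtain ⟨h1, h2⟩ := hI
    subst h1 h2
    rw [show lo + 1 - lo = 1 from by omega]
    simp only [List.range'_one, segQuery]
    by_cases hr : r ≤ lo
    · have hnot : ¬ (lo < r) := by omega
      simp only [List.filter, hnot, decide_false, List.map_nil, if_pos hr]
      rfl
    · simp only [List.filter, (by omega : lo < r), decide_true, List.map]
      rw [if_neg hr, bfold, List.foldl_cons, List.foldl_nil, bBetter_zero_left _ (hg lo)]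
  | node a l rr ihl ihr =>
    intro lo hi r g hI hg
    obtain ⟨hlh, ha, hIl, hIr⟩ := hI
    simp only [segQuery]
    by_cases hr1 : r ≤ lo
    · rw [if_pos hr1]
      have : (List.range' lo (hi - lo)).filter (fun p => decide (p < r)) = [] := by
        rw [List.filter_eq_nil_iff]
        intro p hp
        have := List.mem_range'_1.1 hp
        simp only [decide_eq_true_eq]
        omega
      rw [this]
      rfl
    · rw [if_neg hr1]
      by_cases hr2 : hi ≤ r
      · rw [if_pos hr2]
        have : (List.range' lo (hi - lo)).filter (fun p => decide (p < r)) = List.range' lo (hi - lo) := by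
          rw [List.filter_eq_self]
          intro p hp
          have := List.mem_range'_1.1 hp
          simp only [decide_eq_true_eq]
          omega
        rw [this, ha]
        rfl
      · rw [if_neg hr2]
        have hmid1 : lo ≤ (lo + hi) / 2 := by omega
        have hmid2 : (lo + hi) / 2 ≤ hi := by omega
        rw [ihl lo ((lo + hi) / 2) r g hIl hg, ihr ((lo + hi) / 2) hi r g hIr hg,
          range'_split lo ((lo + hi) / 2) hi hmid1 hmid2, List.filter_append, List.map_append,
          bfold_append _ _ (mapped_good g hg _) (mapped_good g hg _)]

theorem SegInv_congr (t : SegTree) :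
    ∀ (lo hi : Nat) (g g' : Nat → Int × Int), (∀ p, lo ≤ p → p < hi → g p = g' p) →
    SegInv t lo hi g → SegInv t lo hi g' := by
  induction t with
  | leaf a =>
    intro lo hi g g' hgg ⟨h1, h2⟩
    exact ⟨h1, by rw [h2, hgg lo (le_refl _) (by omega)]⟩
  | node a l r ihl ihr =>
    intro lo hi g g' hgg ⟨h1, h2, hIl, hIr⟩
    have hmap : (List.range' lo (hi - lo)).map g = (List.range' lo (hi - lo)).map g' := by
      apply List.map_congr_left
      intro p hp
      have := List.mem_range'_1.1 hp
      exact hgg p (by omega) (by omega)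
    refine ⟨h1, by rw [h2, rangeFold, rangeFold, hmap],
      ihl lo ((lo + hi) / 2) g g' (fun p hp1 hp2 => hgg p hp1 (by omega)) hIl,
      ihr ((lo + hi) / 2) hi g g' (fun p hp1 hp2 => hgg p (by omega) hp2) hIr⟩

theorem rangeFold_update (g : Nat → Int × Int) (hg : Good g) (v : Int × Int) (hv : GoodV v)
    (lo hi pos : Nat) (h1 : lo ≤ pos) (h2 : pos < hi) :
    rangeFold (fun p => if p = pos then bBetter (g pos) v else g p) lo hi
      = bBetter (rangeFold g lo hi) v := by
  have hg' : Good (fun p => if p = pos then bBetter (g pos) v else g p) := by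
    intro p
    dsimp only
    split_ifs
    · exact bBetter_good _ _ (hg pos) hv
    · exact hg p
  unfold rangeFold
  rw [range'_split lo pos hi h1 (by omega),
      show hi - pos = 1 + (hi - (pos + 1)) from by omega, ← List.range'_append_1,
      List.range'_one]
  simp only [List.map_append, List.map_cons, List.cons_append, List.nil_append]
  rw [bfold_append _ _ (mapped_good _ hg' _) (by
        intro x hx
        rcases List.mem_cons.1 hx with rfl | hx'
        · split
          · exact bBetter_good _ _ (hg pos) hv
          · exact hg pos
        · exact mapped_good _ hg' _ x hx'),
      bfold_append _ _ (mapped_good _ hg _) (by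
        intro x hx
        rcases List.mem_cons.1 hx with rfl | hx'
        · exact hg pos
        · exact mapped_good _ hg _ x hx')]
  have e1 : (List.range' lo (pos - lo)).map (fun p => if p = pos then bBetter (g pos) v else g p)
      = (List.range' lo (pos - lo)).map g := by
    apply List.map_congr_left
    intro p hp
    have := List.mem_range'_1.1 hp
    rw [if_neg (by omega)]
  have e2 : (List.range' (pos + 1) (hi - (pos + 1))).map (fun p => if p = pos then bBetter (g pos) v else g p)
      = (List.range' (pos + 1) (hi - (pos + 1))).map g := by
    apply List.map_congr_left
    intro p hp
    have := List.mem_range'_1.1 hp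
    rw [if_neg (by omega)]
  rw [e1, e2]
  have hcons : ∀ (c : Int × Int), GoodV c →
      bfold (c :: (List.range' (pos + 1) (hi - (pos + 1))).map g)
        = bBetter c (bfold ((List.range' (pos + 1) (hi - (pos + 1))).map g)) := by
    intro c hc
    unfold bfold
    rw [List.foldl_cons, bBetter_zero_left c hc]
    exact foldl_bBetter_shift _ c hc (mapped_good _ hg _)
  simp only [if_true]
  rw [hcons _ (bBetter_good _ _ (hg pos) hv), hcons _ (hg pos)]
  simp only [bBetter_assoc, bBetter_comm, bBetter_left_comm]

theorem segUpdate_inv (t : SegTree) :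
    ∀ (lo hi pos : Nat) (v : Int × Int) (g : Nat → Int × Int),
    SegInv t lo hi g → Good g → GoodV v → lo ≤ pos → pos < hi →
    SegInv (segUpdate t lo hi pos v) lo hi (fun p => if p = pos then bBetter (g pos) v else g p) := by
  induction t with
  | leaf a =>
    intro lo hi pos v g ⟨h1, h2⟩ hg hv hp1 hp2
    have hpl : pos = lo := by omega
    subst hpl
    exact ⟨h1, by dsimp only; rw [h2, if_pos rfl]⟩
  | node a l r ihl ihr =>
    intro lo hi pos v g ⟨h1, h2, hIl, hIr⟩ hg hv hp1 hp2
    have hg' : Good (fun p => if p = pos then bBetter (g pos) v else g p) := by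
      intro p
      dsimp only
      split_ifs
      · exact bBetter_good _ _ (hg pos) hv
      · exact hg p
    have hagg : bBetter a v = rangeFold (fun p => if p = pos then bBetter (g pos) v else g p) lo hi := by
      rw [rangeFold_update g hg v hv lo hi pos hp1 hp2, h2]
    simp only [segUpdate]
    by_cases hmid : pos < (lo + hi) / 2
    · rw [if_pos hmid]
      refine ⟨h1, hagg, ihl lo ((lo + hi) / 2) pos v g hIl hg hv hp1 hmid, ?_⟩
      exact SegInv_congr r _ _ g _ (fun p hpa hpb => by rw [if_neg (by omega)]) hIr
    · rw [if_neg hmid]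
      refine ⟨h1, hagg, ?_, ihr ((lo + hi) / 2) hi pos v g hIr hg hv (by omega) hp2⟩
      exact SegInv_congr l _ _ g _ (fun p hpa hpb => by rw [if_neg (by omega)]) hIl

-- ---- the sorted2 order: a strictly lex-sorted permutation of range n ----
def bLt (arr : List Int) (a b : Int) : Bool :=
  decide (PySem.List.pyGetD arr a 0 < PySem.List.pyGetD arr b 0) ||
    !decide (PySem.List.pyGetD arr b 0 < PySem.List.pyGetD arr a 0) && decide (-a < -b)

def ordList (arr : List Int) : List Int :=
  PySem.List.sorted2 (PySem.List.pyRange 0 ((arr.length : Nat) : Int) 1)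
    (fun j => PySem.List.pyGetD arr j 0) (fun j => -j)

theorem ordList_perm (arr : List Int) :
    (ordList arr).Perm (PySem.List.pyRange 0 ((arr.length : Nat) : Int) 1) :=
  PySem.List.sorted2_perm _ _ _ _

theorem bLt_asym (arr : List Int) (a b : Int) (h : bLt arr a b = true) : bLt arr b a = false := by
  unfold bLt at *
  simp only [Bool.or_eq_true, Bool.and_eq_true, Bool.not_eq_true', decide_eq_true_eq,
    decide_eq_false_iff_not, Bool.or_eq_false_iff, Bool.and_eq_false_iff,
    Bool.not_eq_false'] at *
  omega

theorem bLt_trans (arr : List Int) (a b c : Int)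
    (h1 : bLt arr a b = true) (h2 : bLt arr c a = true) : bLt arr c b = true := by
  unfold bLt at *
  simp only [Bool.or_eq_true, Bool.and_eq_true, Bool.not_eq_true', decide_eq_true_eq,
    decide_eq_false_iff_not] at *
  omega

theorem bLt_total (arr : List Int) (a b : Int) (hne : a ≠ b) (h : bLt arr b a = false) :
    bLt arr a b = true := by
  unfold bLt at *
  simp only [Bool.or_eq_true, Bool.and_eq_true, Bool.not_eq_true', decide_eq_true_eq,
    decide_eq_false_iff_not, Bool.or_eq_false_iff, Bool.and_eq_false_iff,
    Bool.not_eq_false'] at *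
  omega

-- inserting into a ¬(later < earlier) sorted list keeps it sorted
theorem insertBy_pairwise (arr : List Int) (x : Int) (acc : List Int)
    (h : acc.Pairwise (fun a b => bLt arr b a = false)) :
    (PySem.List.insertBy (bLt arr) x acc).Pairwise (fun a b => bLt arr b a = false) := by
  induction acc with
  | nil => simp [PySem.List.insertBy]
  | cons y ys ih =>
    rw [List.pairwise_cons] at h
    obtain ⟨hy, hys⟩ := h
    unfold PySem.List.insertBy
    split_ifs with hxy
    · rw [List.pairwise_cons]
      refine ⟨?_, List.pairwise_cons.2 ⟨hy, hys⟩⟩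
      intro z hz
      rcases List.mem_cons.1 hz with rfl | hz'
      · exact bLt_asym arr x z hxy
      · rcases hb : bLt arr z x with _ | _
        · rfl
        · exact absurd (bLt_trans arr x y z hxy hb) (by rw [hy z hz']; simp)
    · rw [List.pairwise_cons]
      refine ⟨?_, ih hys⟩
      intro z hz
      rcases (PySem.List.mem_insertBy _ _ _ _).1 hz with rfl | hz'
      · exact Bool.of_not_eq_true hxy
      · exact hy z hz'

theorem foldl_insertBy_pairwise (arr : List Int) (xs : List Int) :
    ∀ acc, acc.Pairwise (fun a b => bLt arr b a = false) →
    (xs.foldl (fun acc x => PySem.List.insertBy (bLt arr) x acc) acc).Pairwise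
      (fun a b => bLt arr b a = false) := by
  induction xs with
  | nil => intro acc h; exact h
  | cons x xs ih =>
    intro acc h
    exact ih _ (insertBy_pairwise arr x acc h)

theorem ordList_eq_foldl (arr : List Int) :
    ordList arr = (PySem.List.pyRange 0 ((arr.length : Nat) : Int) 1).foldl
      (fun acc x => PySem.List.insertBy (bLt arr) x acc) [] := rfl

theorem ordList_nodup (arr : List Int) : (ordList arr).Nodup :=
  (ordList_perm arr).nodup_iff.2 (PySem.List.nodup_pyRange_one 0 _)

theorem ordList_pairwise (arr : List Int) :
    (ordList arr).Pairwise (fun a b => bLt arr a b = true) := by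
  have h1 : (ordList arr).Pairwise (fun a b => bLt arr b a = false) := by
    rw [ordList_eq_foldl]
    exact foldl_insertBy_pairwise arr _ [] List.Pairwise.nil
  have h2 : (ordList arr).Pairwise (fun a b : Int => a ≠ b) := ordList_nodup arr
  exact (h1.and h2).imp (fun {a b} ⟨hf, hne⟩ => bLt_total arr a b hne hf)

-- ---- reference entries, take/getElem characterizations ----
theorem ents_take (arr : List Int) : ∀ k : Nat, ents (arr.take k) = (ents arr).take k := by
  induction arr using List.reverseRecOn with
  | nil => intro k; simp [ents]
  | append_singleton xs x ih =>
    intro k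
    by_cases hk : k ≤ xs.length
    · rw [List.take_append_of_le_length hk, ih k, ents_snoc]
      unfold entsStep
      rw [List.take_append_of_le_length (by rw [len_ents]; exact hk)]
    · rw [List.take_of_length_le (by simp; omega), ents_snoc]
      unfold entsStep
      rw [List.take_of_length_le (by simp [len_ents]; omega)]

theorem ents_fst (arr : List Int) (j : Nat) (hj : j < arr.length) :
    ((ents arr)[j]'(by rw [len_ents]; exact hj)).1 = arr.getD j 0 := by
  have h1 := fst_ents arr
  have h2 : ((ents arr).map (fun e => e.1))[j]'(by simpa [len_ents] using hj) = arr[j]'hj := by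
    simp only [h1]
  rw [List.getElem_map] at h2
  rw [h2, List.getD_eq_getElem _ _ hj]

theorem ents_getElem (arr : List Int) (k : Nat) (hk : k < arr.length) :
    (ents arr)[k]'(by rw [len_ents]; exact hk)
      = (arr.getD k 0,
         (((ents arr).take k).foldl (pick (arr.getD k 0)) (0, 0)).1 + 1,
         (((ents arr).take k).foldl (pick (arr.getD k 0)) (0, 0)).2 + arr.getD k 0) := by
  have htake : arr.take (k + 1) = arr.take k ++ [arr.getD k 0] := by
    rw [List.take_succ_eq_append_getElem hk, List.getD_eq_getElem _ _ hk]
  have h1 : ents (arr.take (k + 1)) = (ents arr).take (k + 1) := ents_take arr (k + 1)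
  rw [htake, ents_snoc] at h1
  unfold entsStep at h1
  rw [ents_take arr k] at h1
  have hlen : ((ents arr).take k).length = k := by
    rw [List.length_take, len_ents]
    omega
  have hk1 : k < ((ents arr).take (k + 1)).length := by
    rw [List.length_take, len_ents]
    omega
  have h2 : ((ents arr).take (k + 1))[k]'hk1 = (ents arr)[k]'(by rw [len_ents]; exact hk) := by
    exact List.getElem_take
  rw [← h2, List.getElem_of_eq h1.symm hk1]
  rw [List.getElem_append_right (by omega)]
  simp [hlen]

theorem pick_eq (x : Int) (st : Int × Int) (e : Int × Int × Int) :
    pick x st e = if e.1 < x then bBetter st e.2 else st := by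
  unfold pick bBetter
  split_ifs <;> (first | rfl | (refine Prod.ext ?_ ?_ <;> simp_all <;> omega))

theorem bstep_eq (b : Int × Int) (e : Int × Int × Int) : bstep b e = bBetter b e.2 := by
  unfold bstep bBetter
  split_ifs <;> (first | rfl | (refine Prod.ext ?_ ?_ <;> simp_all <;> omega))

-- ---- the per-position slot function of the sweep ----
def entryFun (arr : List Int) (i : Int) : Int × Int :=
  match (ents arr)[i.toNat]? with
  | some e => e.2
  | none => (0, 0)

def gOf (arr : List Int) (P : List Int) : Nat → Int × Int :=
  fun p => if (p : Int) ∈ P then entryFun arr (p : Int) else (0, 0)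

theorem entryFun_good (arr : List Int) (i : Int) : GoodV (entryFun arr i) := by
  unfold entryFun
  cases hg : (ents arr)[i.toNat]? with
  | none => exact Or.inl rfl
  | some e =>
    right
    exact ents_ge_one arr e (List.mem_of_getElem? hg)

theorem gOf_good (arr P : List Int) : Good (gOf arr P) := by
  intro p
  unfold gOf
  split_ifs
  · exact entryFun_good arr p
  · exact Or.inl rfl

theorem bfold_snoc (A : List (Int × Int)) (b : Int × Int) :
    bfold (A ++ [b]) = bBetter (bfold A) b := by
  unfold bfold
  rw [List.foldl_append]
  rfl

theorem fold_g_eq_pick (arr P : List Int) (x : Int) :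
    ∀ k : Nat, k ≤ arr.length →
    (∀ j : Nat, j < k → (((j : Int) ∈ P) ↔ arr.getD j 0 < x)) →
    bfold ((List.range k).map (gOf arr P)) = ((ents arr).take k).foldl (pick x) (0, 0) := by
  intro k
  induction k with
  | zero => intro _ _; simp [bfold, ents]
  | succ k ih =>
    intro hk hchar
    have hkE : k < (ents arr).length := by rw [len_ents]; omega
    rw [List.range_succ, List.map_append, List.map_cons, List.map_nil, bfold_snoc,
        List.take_succ_eq_append_getElem hkE, List.foldl_append, List.foldl_cons, List.foldl_nil,
        ih (by omega) (fun j hj => hchar j (by omega))]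
    set prev := ((ents arr).take k).foldl (pick x) (0, 0) with hprev
    have hgood : GoodV prev := by
      rw [show prev = bfold (List.map (gOf arr P) (List.range k)) from
        (ih (by omega) (fun j hj => hchar j (by omega))).symm]
      exact bfold_good _ (mapped_good _ (gOf_good arr P) _)
    have hfst : ((ents arr)[k]'hkE).1 = arr.getD k 0 := ents_fst arr k (by omega)
    rw [pick_eq, hfst]
    by_cases hlt : arr.getD k 0 < x
    · rw [if_pos hlt]
      have hmem : (k : Int) ∈ P := (hchar k (by omega)).2 hlt
      unfold gOf
      rw [if_pos hmem]
      unfold entryFun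
      rw [show ((k : Int)).toNat = k from by omega, List.getElem?_eq_getElem hkE]
    · rw [if_neg hlt]
      have hmem : ¬ (k : Int) ∈ P := fun hm => hlt ((hchar k (by omega)).1 hm)
      unfold gOf
      rw [if_neg hmem]
      exact bBetter_zero_right prev hgood

theorem loop_lemma (arr : List Int) : ∀ (rest P : List Int) (t : SegTree) (best : Int × Int),
    P ++ rest = ordList arr →
    SegInv t 0 arr.length (gOf arr P) →
    best = bfold (P.map (entryFun arr)) →
    (rest.foldl (fun (st : SegTree × (Int × Int)) i =>
        (segUpdate st.1 0 arr.length i.toNat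
           ((segQuery st.1 0 arr.length i.toNat).1 + 1,
            (segQuery st.1 0 arr.length i.toNat).2 + PySem.List.pyGetD arr i 0),
         bBetter st.2
           ((segQuery st.1 0 arr.length i.toNat).1 + 1,
            (segQuery st.1 0 arr.length i.toNat).2 + PySem.List.pyGetD arr i 0))) (t, best)).2
      = bfold ((P ++ rest).map (entryFun arr)) := by
  intro rest
  induction rest with
  | nil =>
    intro P t best h hI hbest
    simpa using hbest
  | cons i rest' ih =>
    intro P t best h hI hbest
    have hio : i ∈ ordList arr := by
      rw [← h]; exact List.mem_append_right _ List.mem_cons_self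
    have hirange : i ∈ PySem.List.pyRange 0 ((arr.length : Nat) : Int) 1 :=
      (ordList_perm arr).subset hio
    obtain ⟨hi0, hin⟩ := PySem.List.mem_pyRange_one.1 hirange
    have hkn : i.toNat < arr.length := by omega
    have hki : ((i.toNat : Nat) : Int) = i := by omega
    have hnodup : (P ++ i :: rest').Nodup := by rw [h]; exact ordList_nodup arr
    have hiP : i ∉ P := by
      rcases List.nodup_append.1 hnodup with ⟨-, -, hdisj⟩
      intro hm
      exact hdisj i hm i List.mem_cons_self rfl
    have hpw : (P ++ i :: rest').Pairwise (fun a b => bLt arr a b = true) := by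
      rw [h]; exact ordList_pairwise arr
    obtain ⟨hpwP, hpwR, hcross⟩ := List.pairwise_append.1 hpw
    set x := PySem.List.pyGetD arr i 0 with hxdef
    have hx : x = arr.getD i.toNat 0 := by
      rw [hxdef, ← hki, PySem.List.pyGetD_natCast, Int.toNat_natCast]
    have hchar : ∀ j : Nat, j < i.toNat → (((j : Int) ∈ P) ↔ arr.getD j 0 < x) := by
      intro j hj
      constructor
      · intro hm
        have hblt := hcross _ hm _ List.mem_cons_self
        unfold bLt at hblt
        rw [PySem.List.pyGetD_natCast, ← hki, PySem.List.pyGetD_natCast] at hblt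
        simp only [Bool.or_eq_true, Bool.and_eq_true, Bool.not_eq_true', decide_eq_true_eq,
          decide_eq_false_iff_not] at hblt
        rw [hx]
        rcases hblt with hblt | ⟨-, hblt⟩
        · exact hblt
        · exfalso; omega
      · intro hlt
        have hjr : (j : Int) ∈ PySem.List.pyRange 0 ((arr.length : Nat) : Int) 1 :=
          PySem.List.mem_pyRange_one.2 ⟨by exact_mod_cast Nat.zero_le j, by exact_mod_cast (by omega : j < arr.length)⟩
        have hjo : (j : Int) ∈ P ++ i :: rest' := by
          rw [h]; exact ((ordList_perm arr).mem_iff).2 hjr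
        rcases List.mem_append.1 hjo with hP | hR
        · exact hP
        · rcases List.mem_cons.1 hR with heq | hR'
          · exfalso; omega
          · exfalso
            have hblt := List.rel_of_pairwise_cons hpwR hR'
            unfold bLt at hblt
            rw [PySem.List.pyGetD_natCast, ← hki, PySem.List.pyGetD_natCast] at hblt
            simp only [Bool.or_eq_true, Bool.and_eq_true, Bool.not_eq_true', decide_eq_true_eq,
              decide_eq_false_iff_not] at hblt
            rw [hx] at hlt
            rcases hblt with hblt | ⟨hblt, -⟩ <;> omega
    have hq : segQuery t 0 arr.length i.toNat
        = ((ents arr).take i.toNat).foldl (pick x) (0, 0) := by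
      rw [segQuery_inv t 0 arr.length i.toNat (gOf arr P) hI (gOf_good arr P)]
      have hfil : (List.range' 0 (arr.length - 0)).filter (fun p => decide (p < i.toNat))
          = List.range i.toNat := by
        rw [range'_split 0 i.toNat arr.length (Nat.zero_le _) (by omega), List.filter_append,
            List.filter_eq_self.2 (by
              intro p hp
              have := List.mem_range'_1.1 hp
              simp only [decide_eq_true_eq]
              omega),
            List.filter_eq_nil_iff.2 (by
              intro p hp
              have := List.mem_range'_1.1 hp
              simp only [decide_eq_true_eq]
              omega),
            List.append_nil, List.range_eq_range']
        norm_num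
      rw [hfil]
      exact fold_g_eq_pick arr P x i.toNat (by omega) hchar
    have hEk : i.toNat < (ents arr).length := by rw [len_ents]; omega
    have hcur : ((segQuery t 0 arr.length i.toNat).1 + 1, (segQuery t 0 arr.length i.toNat).2 + x)
        = ((ents arr)[i.toNat]'hEk).2 := by
      rw [hq, ents_getElem arr i.toNat hkn, ← hx]
    have hentry : entryFun arr i = ((ents arr)[i.toNat]'hEk).2 := by
      unfold entryFun
      rw [List.getElem?_eq_getElem hEk]
    have hqgood : GoodV (segQuery t 0 arr.length i.toNat) := by
      rw [segQuery_inv t 0 arr.length i.toNat _ hI (gOf_good arr P)]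
      exact bfold_good _ (mapped_good _ (gOf_good arr P) _)
    have hq1 : 0 ≤ (segQuery t 0 arr.length i.toNat).1 := by
      rcases hqgood with hh | hh
      · rw [hh]
      · omega
    have hcurgood : GoodV ((segQuery t 0 arr.length i.toNat).1 + 1,
        (segQuery t 0 arr.length i.toNat).2 + x) := Or.inr (by dsimp only; omega)
    have hI' : SegInv (segUpdate t 0 arr.length i.toNat
          ((segQuery t 0 arr.length i.toNat).1 + 1, (segQuery t 0 arr.length i.toNat).2 + x))
        0 arr.length (gOf arr (P ++ [i])) := by
      have h1 := segUpdate_inv t 0 arr.length i.toNat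
        ((segQuery t 0 arr.length i.toNat).1 + 1, (segQuery t 0 arr.length i.toNat).2 + x)
        (gOf arr P) hI (gOf_good arr P) hcurgood (Nat.zero_le _) hkn
      refine SegInv_congr _ 0 arr.length _ _ ?_ h1
      intro p hp0 hpn
      dsimp only
      by_cases hpk : p = i.toNat
      · subst hpk
        rw [if_pos rfl]
        unfold gOf
        rw [if_neg (by rw [hki]; exact hiP), bBetter_zero_left _ hcurgood,
            if_pos (by rw [hki]; exact List.mem_append_right _ List.mem_cons_self),
            hki, hentry, hcur]
      · rw [if_neg hpk]
        unfold gOf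
        have hiff : ((p : Int) ∈ P ++ [i]) ↔ ((p : Int) ∈ P) := by
          rw [List.mem_append, List.mem_singleton]
          constructor
          · rintro (hh | hh)
            · exact hh
            · exact absurd (by omega : p = i.toNat) hpk
          · exact Or.inl
        rw [if_congr hiff rfl rfl]
    have hbest' : bBetter best ((segQuery t 0 arr.length i.toNat).1 + 1,
        (segQuery t 0 arr.length i.toNat).2 + x) = bfold ((P ++ [i]).map (entryFun arr)) := by
      rw [List.map_append, List.map_cons, List.map_nil, bfold_snoc, ← hbest, hentry, hcur]
    rw [List.foldl_cons]
    have hres := ih (P ++ [i]) _ _ (by rw [List.append_assoc]; simpa using h) hI' hbest'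
    rw [show (P ++ i :: rest') = (P ++ [i]) ++ rest' from by simp]
    exact hres

-- ===== VERDICT helper: B's characterization =====
theorem B_char (arr : List Int) :
    nonLisMaxSum_alt arr = arr.sum - ((ents arr).foldl bstep (0, 0)).2 := by
  have hshow : nonLisMaxSum_alt arr = arr.sum -
      ((ordList arr).foldl (fun (st : SegTree × (Int × Int)) i =>
        (segUpdate st.1 0 arr.length i.toNat
           ((segQuery st.1 0 arr.length i.toNat).1 + 1,
            (segQuery st.1 0 arr.length i.toNat).2 + PySem.List.pyGetD arr i 0),
         bBetter st.2
           ((segQuery st.1 0 arr.length i.toNat).1 + 1,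
            (segQuery st.1 0 arr.length i.toNat).2 + PySem.List.pyGetD arr i 0)))
        (segBuild 0 arr.length, (0, 0))).2.2 := rfl
  by_cases harr : arr = []
  · subst harr
    decide
  · have hn : 0 < arr.length := List.length_pos_of_ne_nil harr
    rw [hshow]
    have hinv0 : SegInv (segBuild 0 arr.length) 0 arr.length (gOf arr []) := by
      refine SegInv_congr _ 0 arr.length _ _ ?_ (segBuild_inv 0 arr.length hn)
      intro p _ _
      simp [gOf]
    have hloop := loop_lemma arr (ordList arr) [] (segBuild 0 arr.length) (0, 0)
      (by simp) hinv0 (by simp [bfold])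
    rw [List.nil_append] at hloop
    rw [hloop]
    have hrc : RightCommutative bBetter :=
      ⟨fun b a1 a2 => by rw [bBetter_assoc, bBetter_assoc, bBetter_comm a1 a2]⟩
    have hperm : ((ordList arr).map (entryFun arr)).Perm
        ((PySem.List.pyRange 0 ((arr.length : Nat) : Int) 1).map (entryFun arr)) :=
      (ordList_perm arr).map _
    have h1 : bfold ((ordList arr).map (entryFun arr))
        = bfold ((PySem.List.pyRange 0 ((arr.length : Nat) : Int) 1).map (entryFun arr)) :=
      @List.Perm.foldl_eq _ _ bBetter _ _ hrc hperm (0, 0)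
    have h2 : (PySem.List.pyRange 0 ((arr.length : Nat) : Int) 1).map (entryFun arr)
        = (ents arr).map (fun e => e.2) := by
      apply List.ext_getElem
      · simp [PySem.List.length_pyRange_one, len_ents]
      · intro j hj1 hj2
        have hjn : j < arr.length := by
          simpa [PySem.List.length_pyRange_one] using hj1
        have hjE : j < (ents arr).length := by rw [len_ents]; exact hjn
        rw [List.getElem_map, List.getElem_map, PySem.List.getElem_pyRange_one]
        unfold entryFun
        rw [show ((0 : Int) + (j : Int)).toNat = j from by omega, List.getElem?_eq_getElem hjE]
    rw [h1, h2]
    unfold bfold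
    rw [List.foldl_map]
    have h3 : (fun (b : Int × Int) (e : Int × Int × Int) => bBetter b e.2) = bstep := by
      funext b e
      rw [bstep_eq]
    rw [h3]

-- ===== VERDICT (by name: the statement is the Claim_ definition above) =====
theorem nonLisMaxSum_spec : Claim_equal_nonLisMaxSum := by
  intro arr _ hpre
  unfold Spec_nonLisMaxSum
  rw [A_char arr hpre, B_char arr]
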